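-- pv_equiv track=rewrite | github.com/GMWA/koodu-model-generator | backend/modelgenerator/utils/password.py | check_password_policy
-- ===== SOURCE A (Python) =====
-- def check_password_policy(password: str) -> bool:
--     """Check if password meets the policy:
--             - at least 8 characters,
--             - 1 uppercase,
--             - 1 lowercase,
--             - 1 number,
--             - 1 special character
--
--         Args:
--             password (str): password to check
--
--         Returns:
--             bool: True if password meets the policy, False otherwise
--     """
--     if len(password) < 8:
--         return False
--     if not any(char.isupper() for char in password):
--         return False
--     if not any(char.islower() for char in password):
--         return False
--     if not any(char.isdigit() for char in password):
--         return False
--     if not any(not char.isalnum() for char in password):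
--         return False
--     return True
-- ===== SOURCE B (Python) =====
-- def check_password_policy(password: str) -> bool:
--     has_upper = has_lower = has_digit = has_special = False
--     for char in password:
--         if char.isupper():
--             has_upper = True
--         if char.islower():
--             has_lower = True
--         if char.isdigit():
--             has_digit = True
--         if not char.isalnum():
--             has_special = True
--     return len(password) >= 8 and has_upper and has_lower and has_digit and has_special
-- ===== Notes on version B (the rewrite author's own statement) =====
-- stated objective: simpler
-- what changed: Replaces A's four separate any(...) scans of the password with one loop that accumulates four booleans and a single final conjunction.
import Mathlib
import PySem

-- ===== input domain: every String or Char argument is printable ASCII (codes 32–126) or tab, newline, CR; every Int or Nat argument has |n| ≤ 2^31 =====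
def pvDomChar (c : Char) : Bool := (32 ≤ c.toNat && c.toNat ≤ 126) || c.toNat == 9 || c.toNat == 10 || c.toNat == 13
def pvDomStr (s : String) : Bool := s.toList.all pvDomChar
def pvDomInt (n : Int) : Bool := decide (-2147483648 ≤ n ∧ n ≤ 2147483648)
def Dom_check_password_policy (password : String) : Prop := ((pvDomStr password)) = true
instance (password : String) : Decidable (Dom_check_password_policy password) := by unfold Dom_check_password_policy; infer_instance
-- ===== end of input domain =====

-- B replaces A's four separate any(...) scans with one loop accumulating four booleans (simpler decomposition).

-- ===== PORT A =====
def check_password_policy (password : String) : Bool :=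
  if PySem.Str.len password < 8 then false
  else if !(password.toList.any (fun c => PySem.Chars.isupper c)) then false
  else if !(password.toList.any (fun c => PySem.Chars.islower c)) then false
  else if !(password.toList.any (fun c => PySem.Chars.isdigit c)) then false
  else if !(password.toList.any (fun c => !(PySem.Chars.isalnum c))) then false
  else true

-- ===== PORT B =====
def check_password_policy_alt (password : String) : Bool :=
  let st := password.toList.foldl
    (fun (f : Bool × Bool × Bool × Bool) c =>
      ( f.1 || PySem.Chars.isupper c,
        f.2.1 || PySem.Chars.islower c,
        f.2.2.1 || PySem.Chars.isdigit c,
        f.2.2.2 || !(PySem.Chars.isalnum c)))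
    (false, false, false, false)
  decide (8 ≤ PySem.Str.len password) && st.1 && st.2.1 && st.2.2.1 && st.2.2.2

-- ===== PRECONDITION & SPEC =====
def Spec_check_password_policy (password : String) (out : Bool) : Prop := out = check_password_policy_alt password
instance (password : String) (out : Bool) : Decidable (Spec_check_password_policy password out) := by unfold Spec_check_password_policy; infer_instance

-- ===== CLAIM (what is proved, stated in full; the proofs are below) =====
def Claim_equal_check_password_policy : Prop := ∀ (password : String), Dom_check_password_policy password → Spec_check_password_policy password (check_password_policy password)

-- ===== LEMMAS AND PROOFS =====
theorem flags_foldl (l : List Char) (a b c d : Bool) :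
    l.foldl (fun (f : Bool × Bool × Bool × Bool) ch =>
      ( f.1 || PySem.Chars.isupper ch,
        f.2.1 || PySem.Chars.islower ch,
        f.2.2.1 || PySem.Chars.isdigit ch,
        f.2.2.2 || !(PySem.Chars.isalnum ch))) (a, b, c, d)
    = ( a || l.any (fun ch => PySem.Chars.isupper ch),
        b || l.any (fun ch => PySem.Chars.islower ch),
        c || l.any (fun ch => PySem.Chars.isdigit ch),
        d || l.any (fun ch => !(PySem.Chars.isalnum ch))) := by
  induction l generalizing a b c d with
  | nil => simp
  | cons x xs ih => simp [List.foldl_cons, ih, Bool.or_assoc]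

-- ===== VERDICT (by name: the statement is the Claim_ definition above) =====
theorem check_password_policy_spec : Claim_equal_check_password_policy := by
  intro password _
  unfold Spec_check_password_policy check_password_policy check_password_policy_alt
  rw [flags_foldl]
  simp only [Bool.false_or]
  split_ifs with h1 h2 h3 h4 h5 <;> simp_all
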